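-- pv_equiv track=rewrite | github.com/drapindesigner/building-number-detection | perception/domain.py | _candidate_variants
-- ===== SOURCE A (Python) =====
-- from typing import Iterable, Optional, Set
--
-- _DIGIT_LOOKALIKE = {
--     "O": ["0"],
--     "Q": ["0"],
--     "D": ["0"],
--     "I": ["1"],
--     "L": ["1"],
--     "T": ["1"],
--     "Z": ["2"],
--     "S": ["5"],
--     "G": ["6"],
--     "B": ["8"],
-- }
--
-- def _numeric_variants(text: str) -> Set[str]:
--     options: list[list[str]] = []
--     for ch in text:
--         if ch.isdigit():
--             options.append([ch])
--             continue
--         replacements = _DIGIT_LOOKALIKE.get(ch, [])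
--         if not replacements:
--             return set()
--         options.append(replacements)
--
--     variants: Set[str] = set()
--     def _build(idx: int, buffer: list[str]) -> None:
--         if idx == len(options):
--             variants.add("".join(buffer))
--             return
--         for candidate in options[idx]:
--             buffer.append(candidate)
--             _build(idx + 1, buffer)
--             buffer.pop()
--
--     _build(0, [])
--     return variants
--
-- def _candidate_variants(value: str) -> Set[str]:
--     cleaned = "".join(ch for ch in value if ch.isalnum())
--     if not cleaned:
--         return set()
--     cleaned = cleaned.upper()
--     variants: Set[str] = set()
--
--     if cleaned[-1].isalpha():
--         suffix = cleaned[-1]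
--         numeric_part = cleaned[:-1]
--         if not numeric_part:
--             return set()
--         for numeric_variant in _numeric_variants(numeric_part):
--             canonical = numeric_variant.zfill(3) + suffix
--             variants.add(canonical)
--     else:
--         for numeric_variant in _numeric_variants(cleaned):
--             variants.add(numeric_variant.zfill(3))
--     return variants
-- ===== SOURCE B (Python) =====
-- from typing import Set
--
-- _LOOKALIKE = {
--     "O": "0", "Q": "0", "D": "0", "I": "1", "L": "1",
--     "T": "1", "Z": "2", "S": "5", "G": "6", "B": "8",
-- }
--
-- def _candidate_variants(value: str) -> Set[str]:
--     cleaned = "".join(ch for ch in value if ch.isalnum()).upper()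
--     if not cleaned:
--         return set()
--     if cleaned[-1].isalpha():
--         body, suffix = cleaned[:-1], cleaned[-1]
--     else:
--         body, suffix = cleaned, ""
--     if not body:
--         return set()
--     digits = []
--     for ch in body:
--         if ch.isdigit():
--             digits.append(ch)
--         elif ch in _LOOKALIKE:
--             digits.append(_LOOKALIKE[ch])
--         else:
--             return set()
--     return {"".join(digits).zfill(3) + suffix}
-- ===== Notes on version B (the rewrite author's own statement) =====
-- stated objective: simpler
-- what changed: Replaces the options-list plus recursive Cartesian-product backtracking builder of _numeric_variants with one direct linear pass that maps each character to its single replacement (each lookalike has exactly one), bailing out on the first unmapped character.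
import Mathlib
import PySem

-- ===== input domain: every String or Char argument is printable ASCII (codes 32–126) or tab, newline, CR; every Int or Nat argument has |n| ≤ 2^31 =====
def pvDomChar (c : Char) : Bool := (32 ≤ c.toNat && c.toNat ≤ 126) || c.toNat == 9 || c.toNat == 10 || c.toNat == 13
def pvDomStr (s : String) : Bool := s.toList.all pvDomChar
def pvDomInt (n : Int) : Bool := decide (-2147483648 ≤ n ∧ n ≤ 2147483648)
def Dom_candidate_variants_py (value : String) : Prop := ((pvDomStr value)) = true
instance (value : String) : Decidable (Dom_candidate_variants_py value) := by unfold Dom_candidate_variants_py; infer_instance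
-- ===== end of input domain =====

-- B replaces A's options-list + recursive Cartesian-product builder with a single direct
-- pass that maps each character to its one replacement (objective: simpler).

-- ===== PORT A =====
-- _DIGIT_LOOKALIKE: values are lists of 1-char strings (here: lists of List Char)
def pvLookalikeA : PySem.Dict Char (List (List Char)) :=
  PySem.Dict.mk [('O', [['0']]), ('Q', [['0']]), ('D', [['0']]), ('I', [['1']]), ('L', [['1']]),
   ('T', [['1']]), ('Z', [['2']]), ('S', [['5']]), ('G', [['6']]), ('B', [['8']])]

-- the first loop of _numeric_variants: builds `options`; none = the early `return set()`
def pvOptionsA : List Char → Option (List (List (List Char)))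
  | [] => some []
  | ch :: rest =>
    if PySem.Chars.isdigit ch then
      (pvOptionsA rest).map (fun opts => [[ch]] :: opts)
    else
      let replacements := pvLookalikeA.getD ch []
      if replacements = [] then none
      else (pvOptionsA rest).map (fun opts => replacements :: opts)

-- the nested `_build(idx, buffer)` recursion, accumulating into `variants`
def pvBuildA (options : List (List (List Char))) (buffer : List (List Char))
    (variants : PySem.Set (List Char)) : PySem.Set (List Char) :=
  match options with
  | [] => PySem.Set.add variants (PySem.Chars.join [] buffer)
  | opts :: rest =>
      opts.foldl (fun v candidate => pvBuildA rest (buffer ++ [candidate]) v) variants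

def pvNumericVariantsA (text : List Char) : PySem.Set (List Char) :=
  match pvOptionsA text with
  | none => PySem.Set.empty
  | some options => pvBuildA options [] PySem.Set.empty

def candidate_variants_py (value : String) : List String :=
  let cleaned := value.toList.filter PySem.Chars.isalnum
  if cleaned = [] then []
  else
    let cleaned2 := PySem.Chars.upper cleaned
    let last := cleaned2.getLast!
    if PySem.Chars.isalpha last then
      let numeric_part := cleaned2.dropLast
      if numeric_part = [] then []
      else
        ((pvNumericVariantsA numeric_part).foldl
          (fun v nv => PySem.Set.add v (PySem.Chars.zfill nv 3 ++ [last]))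
          PySem.Set.empty).map String.ofList
    else
      ((pvNumericVariantsA cleaned2).foldl
        (fun v nv => PySem.Set.add v (PySem.Chars.zfill nv 3))
        PySem.Set.empty).map String.ofList

-- ===== PORT B =====
def pvLookalikeB : PySem.Dict Char Char :=
  PySem.Dict.mk [('O', '0'), ('Q', '0'), ('D', '0'), ('I', '1'), ('L', '1'),
   ('T', '1'), ('Z', '2'), ('S', '5'), ('G', '6'), ('B', '8')]

-- B's single pass over `body`; none = the `return set()` on an unmapped character
def pvTranslateB : List Char → Option (List Char)
  | [] => some []
  | ch :: rest =>
    if PySem.Chars.isdigit ch then (pvTranslateB rest).map (ch :: ·)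
    else
      match PySem.Dict.get? pvLookalikeB ch with
      | some d => (pvTranslateB rest).map (d :: ·)
      | none => none

def candidate_variants_py_alt (value : String) : List String :=
  let cleaned := PySem.Chars.upper (value.toList.filter PySem.Chars.isalnum)
  if cleaned = [] then []
  else
    let bodySuffix :=
      if PySem.Chars.isalpha cleaned.getLast! then (cleaned.dropLast, [cleaned.getLast!])
      else (cleaned, [])
    if bodySuffix.1 = [] then []
    else
      match pvTranslateB bodySuffix.1 with
      | none => []
      | some digits => [String.ofList (PySem.Chars.zfill digits 3 ++ bodySuffix.2)]

-- ===== PRECONDITION & SPEC =====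
def Spec_candidate_variants_py (value : String) (out : List String) : Prop := out = candidate_variants_py_alt value
instance (value : String) (out : List String) : Decidable (Spec_candidate_variants_py value out) := by unfold Spec_candidate_variants_py; infer_instance

-- ===== CLAIM (what is proved, stated in full; the proofs are below) =====
def Claim_equal_candidate_variants_py : Prop := ∀ (value : String), Dom_candidate_variants_py value → Spec_candidate_variants_py value (candidate_variants_py value)

-- ===== LEMMAS AND PROOFS =====

-- A's options list is exactly B's translation, each entry wrapped as a singleton option list
-- the two literal lookup tables agree, entry for entry
set_option maxHeartbeats 1000000 in
theorem pvLook_eq (ch : Char) :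
    pvLookalikeA.getD ch [] =
      (match PySem.Dict.get? pvLookalikeB ch with
       | some d => [[d]]
       | none => ([] : List (List Char))) := by
  simp only [pvLookalikeA, pvLookalikeB, PySem.Dict.getD_eq_get?_getD, PySem.Dict.get?_mk_cons]
  split_ifs <;> rfl

-- A's options list is exactly B's translation, each entry wrapped as a singleton option list
theorem pvOptionsA_eq (text : List Char) :
    pvOptionsA text = (pvTranslateB text).map (fun ds => ds.map (fun d => [[d]])) := by
  induction text with
  | nil => rfl
  | cons ch rest ih =>
    simp only [pvOptionsA, pvTranslateB]
    by_cases hd : PySem.Chars.isdigit ch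
    · simp only [hd, if_true, ih, Option.map_map]
      cases pvTranslateB rest <;> rfl
    · simp only [hd, pvLook_eq]
      cases PySem.Dict.get? pvLookalikeB ch with
      | none => simp
      | some d =>
        simp only [ih, Option.map_map]
        cases pvTranslateB rest <;> simp

-- building over all-singleton options adds exactly one string
theorem pvBuildA_singletons (ds : List Char) :
    ∀ buffer variants, pvBuildA (ds.map (fun d => [[d]])) buffer variants
      = PySem.Set.add variants (PySem.Chars.join [] (buffer ++ ds.map (fun d => [d]))) := by
  induction ds with
  | nil => intro buffer variants; simp [pvBuildA]
  | cons d rest ih =>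
    intro buffer variants
    simp only [List.map_cons, pvBuildA, List.foldl_cons, List.foldl_nil]
    rw [ih]
    simp

theorem pvNumericVariantsA_eq (text : List Char) :
    pvNumericVariantsA text =
      match pvTranslateB text with
      | none => []
      | some ds => [ds] := by
  unfold pvNumericVariantsA
  rw [pvOptionsA_eq]
  cases pvTranslateB text with
  | none => rfl
  | some ds =>
    simp only [Option.map_some]
    have := pvBuildA_singletons ds [] PySem.Set.empty
    simp only [List.nil_append] at this
    rw [this, PySem.Chars.join_nil_singletons]
    rfl

theorem upper_eq_nil_iff (cs : List Char) : PySem.Chars.upper cs = [] ↔ cs = [] := by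
  simp [PySem.Chars.upper]

-- ===== VERDICT (by name: the statement is the Claim_ definition above) =====
theorem candidate_variants_py_spec : Claim_equal_candidate_variants_py := by
  intro value _
  unfold Spec_candidate_variants_py candidate_variants_py candidate_variants_py_alt
  generalize value.toList.filter PySem.Chars.isalnum = cs
  by_cases h0 : cs = []
  · simp [h0, upper_eq_nil_iff]
  · have hne : PySem.Chars.upper cs ≠ [] := (upper_eq_nil_iff _).not.mpr h0
    by_cases ha : PySem.Chars.isalpha ((PySem.Chars.upper cs).getLast?.getD 'A') = true
    · by_cases hn : (PySem.Chars.upper cs).dropLast = []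
      · simp [h0, hne, ha, hn]
      · cases htr : pvTranslateB (PySem.Chars.upper cs).dropLast with
        | none => simp [h0, hne, ha, hn, pvNumericVariantsA_eq, htr]
        | some ds =>
          simp [h0, hne, ha, hn, pvNumericVariantsA_eq, htr, PySem.Set.empty, PySem.Set.add]
    · cases htr : pvTranslateB (PySem.Chars.upper cs) with
      | none => simp [h0, hne, ha, pvNumericVariantsA_eq, htr]
      | some ds =>
        simp [h0, hne, ha, pvNumericVariantsA_eq, htr, PySem.Set.empty, PySem.Set.add]
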